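-- pv_equiv track=rewrite | github.com/flowerpower13/utils | _string_utils.py | search_ngrams_in_window
-- ===== SOURCE A (Python) =====
-- def search_ngrams_in_window(left_window, right_window, ngrams2_indexes_container, ngrams_2):
--     # This dictionary will store the ngrams found in the windows along with their frequencies.
--     ngrams_in_window = dict()
--
--     # Iterate over all ngram sizes.
--     for ngram_size in ngrams2_indexes_container.keys():
--         # Get the dictionary that maps indexes to ngrams for the current ngram size.
--         indexes_ngrams = ngrams2_indexes_container[ngram_size][1]
--
--         # Iterate over all positions in the windows.
--         for index in range(left_window, right_window + 1):
--             # If the current position has an ngram of the current size.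
--             if index in indexes_ngrams:
--                 # Get the ngram at the current position.
--                 ngram_in_position = indexes_ngrams[index]
--
--                 # If the ngram is one of the target ngrams.
--                 if ngram_in_position in ngrams_2:
--                     # If the ngram has not been seen before, add it to the dictionary.
--                     if ngram_in_position not in ngrams_in_window:
--                         ngrams_in_window[ngram_in_position] = 0
--                     # Increment the frequency of the ngram.
--                     ngrams_in_window[ngram_in_position] += 1
--
--     # Return the dictionary of ngrams and their frequencies.
--     return ngrams_in_window
-- ===== SOURCE B (Python) =====
-- def search_ngrams_in_window(left_window, right_window, ngrams2_indexes_container, ngrams_2):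
--     targets = set(ngrams_2)
--     counts = {}
--     for ngram_size in ngrams2_indexes_container:
--         indexes_ngrams = ngrams2_indexes_container[ngram_size][1]
--         # Visit only the stored positions, in increasing order, stopping past the window.
--         for index in sorted(indexes_ngrams):
--             if index > right_window:
--                 break
--             if index >= left_window:
--                 ngram = indexes_ngrams[index]
--                 if ngram in targets:
--                     counts[ngram] = counts.get(ngram, 0) + 1
--     return counts
-- ===== Notes on version B (the rewrite author's own statement) =====
-- stated objective: alternative
-- what changed: Instead of probing the index dict at every position of the window, B walks each size's stored positions in sorted order and breaks once past the right edge, counting target ngrams (precomputed as a set) as it goes; Pre_ excludes only inputs where a container value has fewer than 2 elements, on which A raises IndexError.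
import Mathlib
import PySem

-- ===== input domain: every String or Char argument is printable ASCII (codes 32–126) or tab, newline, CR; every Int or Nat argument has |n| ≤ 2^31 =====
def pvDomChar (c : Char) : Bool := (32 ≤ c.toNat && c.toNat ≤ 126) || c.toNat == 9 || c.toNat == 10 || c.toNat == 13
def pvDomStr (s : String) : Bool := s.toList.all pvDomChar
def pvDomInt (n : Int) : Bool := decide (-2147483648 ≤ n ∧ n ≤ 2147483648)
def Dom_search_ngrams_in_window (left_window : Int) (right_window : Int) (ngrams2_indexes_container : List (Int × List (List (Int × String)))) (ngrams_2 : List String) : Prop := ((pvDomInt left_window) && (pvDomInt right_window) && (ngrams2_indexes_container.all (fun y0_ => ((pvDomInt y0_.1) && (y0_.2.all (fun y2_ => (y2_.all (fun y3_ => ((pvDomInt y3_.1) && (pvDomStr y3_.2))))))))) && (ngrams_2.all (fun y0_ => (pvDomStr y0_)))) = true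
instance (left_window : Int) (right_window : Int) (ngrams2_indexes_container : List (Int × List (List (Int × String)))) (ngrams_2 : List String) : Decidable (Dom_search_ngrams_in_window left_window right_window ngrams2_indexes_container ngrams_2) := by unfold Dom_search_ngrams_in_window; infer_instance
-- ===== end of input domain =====

-- B replaces A's probe of the index dict at every window position by a walk over each size's
-- stored positions in sorted order that stops once past the window.

-- ===== PORT A =====
-- literal transliteration of A: dicts are PySem.Dict, `container[k][1]` is pyGet? (in range under Pre_)
def search_ngrams_in_window (left_window : Int) (right_window : Int) (ngrams2_indexes_container : List (Int × List (List (Int × String)))) (ngrams_2 : List String) : List (String × Int) :=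
  let cont : PySem.Dict Int (List (List (Int × String))) := PySem.Dict.ofList ngrams2_indexes_container
  let ngrams_in_window : PySem.Dict String Int :=
    cont.keys.foldl (fun acc ngram_size =>
      (PySem.List.pyRange left_window (right_window + 1) 1).foldl (fun acc2 index =>
        if (PySem.Dict.ofList ((PySem.List.pyGet? (cont.getD ngram_size []) 1).getD [])).contains index then
          let ngram_in_position := (PySem.Dict.ofList ((PySem.List.pyGet? (cont.getD ngram_size []) 1).getD [])).getD index ""
          if ngrams_2.contains ngram_in_position then
            (if acc2.contains ngram_in_position then acc2
             else acc2.insert ngram_in_position 0).insert ngram_in_position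
              ((if acc2.contains ngram_in_position then acc2
                else acc2.insert ngram_in_position 0).getD ngram_in_position 0 + 1)
          else acc2
        else acc2) acc) PySem.Dict.empty
  ngrams_in_window.items

-- ===== PORT B =====
-- Source B's inner loop: walk the sorted stored positions, break past the window, count target ngrams.
-- `indexes_ngrams[index]` is ported as getD with "" — index is drawn from the dict's own keys, so
-- the lookup always succeeds.
def pvLoopB (left_window : Int) (right_window : Int) (indexes_ngrams : PySem.Dict Int String)
    (targets : PySem.Set String) : List Int → PySem.Dict String Int → PySem.Dict String Int
  | [], counts => counts
  | index :: rest, counts =>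
    if right_window < index then counts
    else pvLoopB left_window right_window indexes_ngrams targets rest
      (if left_window ≤ index then
        let ngram := indexes_ngrams.getD index ""
        if targets.contains ngram then counts.insert ngram (counts.getD ngram 0 + 1) else counts
       else counts)

-- literal transliteration of Source B
def search_ngrams_in_window_alt (left_window : Int) (right_window : Int) (ngrams2_indexes_container : List (Int × List (List (Int × String)))) (ngrams_2 : List String) : List (String × Int) :=
  let targets : PySem.Set String := PySem.Set.ofList ngrams_2
  let cont : PySem.Dict Int (List (List (Int × String))) := PySem.Dict.ofList ngrams2_indexes_container
  let counts : PySem.Dict String Int :=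
    cont.keys.foldl (fun acc ngram_size =>
      let indexes_ngrams := PySem.Dict.ofList ((PySem.List.pyGet? (cont.getD ngram_size []) 1).getD [])
      pvLoopB left_window right_window indexes_ngrams targets
        (PySem.List.sorted indexes_ngrams.keys (fun i => i) false) acc) PySem.Dict.empty
  counts.items

-- ===== PRECONDITION & SPEC =====
-- Pre_ excludes exactly the inputs on which A raises IndexError: a container value (the one the Python
-- dict keeps for its key) whose list has fewer than 2 elements, so that `container[k][1]` fails.
def Pre_search_ngrams_in_window (left_window : Int) (right_window : Int) (ngrams2_indexes_container : List (Int × List (List (Int × String)))) (ngrams_2 : List String) : Prop :=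
  ∀ p ∈ (PySem.Dict.ofList ngrams2_indexes_container).items, 2 ≤ p.2.length
instance (left_window : Int) (right_window : Int) (ngrams2_indexes_container : List (Int × List (List (Int × String)))) (ngrams_2 : List String) : Decidable (Pre_search_ngrams_in_window left_window right_window ngrams2_indexes_container ngrams_2) := by unfold Pre_search_ngrams_in_window; infer_instance

def pvWitness_search_ngrams_in_window : Int × Int × (List (Int × List (List (Int × String)))) × List String :=
  (0, 2, [(2, [[], [(1, "a"), (3, "b")]])], ["a", "b"])

def Spec_search_ngrams_in_window (left_window : Int) (right_window : Int) (ngrams2_indexes_container : List (Int × List (List (Int × String)))) (ngrams_2 : List String) (out : List (String × Int)) : Prop := out = search_ngrams_in_window_alt left_window right_window ngrams2_indexes_container ngrams_2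
instance (left_window : Int) (right_window : Int) (ngrams2_indexes_container : List (Int × List (List (Int × String)))) (ngrams_2 : List String) (out : List (String × Int)) : Decidable (Spec_search_ngrams_in_window left_window right_window ngrams2_indexes_container ngrams_2 out) := by unfold Spec_search_ngrams_in_window; infer_instance

-- ===== CLAIM (what is proved, stated in full; the proofs are below) =====
def Claim_equal_search_ngrams_in_window : Prop := ∀ (left_window : Int) (right_window : Int) (ngrams2_indexes_container : List (Int × List (List (Int × String)))) (ngrams_2 : List String), Dom_search_ngrams_in_window left_window right_window ngrams2_indexes_container ngrams_2 → Pre_search_ngrams_in_window left_window right_window ngrams2_indexes_container ngrams_2 → Spec_search_ngrams_in_window left_window right_window ngrams2_indexes_container ngrams_2 (search_ngrams_in_window left_window right_window ngrams2_indexes_container ngrams_2)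

-- ===== LEMMAS AND PROOFS =====

-- A's two-step "ensure key then += 1" update equals the one-step counting insert
theorem pv_upd_eq (acc : PySem.Dict String Int) (g : String) :
    (if acc.contains g then acc else acc.insert g 0).insert g
        ((if acc.contains g then acc else acc.insert g 0).getD g 0 + 1)
      = acc.insert g (acc.getD g 0 + 1) := by
  by_cases h : acc.contains g
  · simp [h]
  · have h' : acc.contains g = false := by simpa using h
    simp only [h', Bool.false_eq_true, if_false]
    rw [PySem.Dict.getD_insert_self, PySem.Dict.insert_insert_self,
        PySem.Dict.getD_of_not_contains acc 0 h']

-- folding over a filterMap is folding with the option test inlined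
theorem pv_foldl_filterMap {α β γ : Type} (f : α → Option β) (step : γ → β → γ)
    (l : List α) (init : γ) :
    (l.filterMap f).foldl step init
      = l.foldl (fun acc a => (f a).elim acc (fun b => step acc b)) init := by
  induction l generalizing init with
  | nil => rfl
  | cons x xs ih =>
    cases hx : f x <;> simp [hx, ih]

-- characterisation of the per-position option made from a lookup plus the target test
theorem pv_F_some (d : PySem.Dict Int String) (tgt : List String) (i : Int) (p : Int × String) :
    ((d.get? i).bind (fun g => if tgt.contains g then some (i, g) else none) = some p)
      ↔ (p.1 = i ∧ d.get? i = some p.2 ∧ tgt.contains p.2 = true) := by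
  cases h : d.get? i with
  | none => simp
  | some g =>
    by_cases ht : tgt.contains g
    · simp only [Option.bind_some, ht, if_true]
      constructor
      · intro hc; cases Option.some.inj hc; exact ⟨rfl, rfl, ht⟩
      · rintro ⟨h1, h2, _⟩
        cases p; cases h2; simp_all
    · have ht' : tgt.contains g = false := by simpa using ht
      simp only [Option.bind_some, ht', Bool.false_eq_true, if_false]
      constructor
      · intro hc; cases hc
      · rintro ⟨h1, h2, h3⟩
        cases p; cases h2; simp_all

-- A's inner loop over the window positions IS a fold of the counting step over the hit options
theorem pv_A_inner (lw rw : Int) (xs : List (Int × String)) (tgt : List String)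
    (acc : PySem.Dict String Int) :
    (PySem.List.pyRange lw (rw + 1) 1).foldl (fun acc2 index =>
        if (PySem.Dict.ofList xs).contains index then
          let ngram_in_position := (PySem.Dict.ofList xs).getD index ""
          if tgt.contains ngram_in_position then
            (if acc2.contains ngram_in_position then acc2
             else acc2.insert ngram_in_position 0).insert ngram_in_position
              ((if acc2.contains ngram_in_position then acc2
                else acc2.insert ngram_in_position 0).getD ngram_in_position 0 + 1)
          else acc2
        else acc2) acc
      = ((PySem.List.pyRange lw (rw + 1) 1).filterMap
          (fun i => ((PySem.Dict.ofList xs).get? i).bind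
            (fun g => if tgt.contains g then some (i, g) else none))).foldl
          (fun c p => c.insert p.2 (c.getD p.2 0 + 1)) acc := by
  rw [pv_foldl_filterMap]
  have hfg : (fun (acc2 : PySem.Dict String Int) (index : Int) =>
        if (PySem.Dict.ofList xs).contains index then
          let ngram_in_position := (PySem.Dict.ofList xs).getD index ""
          if tgt.contains ngram_in_position then
            (if acc2.contains ngram_in_position then acc2
             else acc2.insert ngram_in_position 0).insert ngram_in_position
              ((if acc2.contains ngram_in_position then acc2
                else acc2.insert ngram_in_position 0).getD ngram_in_position 0 + 1)
          else acc2
        else acc2)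
      = (fun (acc2 : PySem.Dict String Int) (i : Int) =>
          (((PySem.Dict.ofList xs).get? i).bind
              (fun g => if tgt.contains g then some (i, g) else none)).elim acc2
            (fun p => acc2.insert p.2 (acc2.getD p.2 0 + 1))) := by
    funext acc2 i
    cases h : (PySem.Dict.ofList xs).get? i with
    | none =>
      simp [PySem.Dict.contains_eq_isSome_get?, h]
    | some g =>
      rw [PySem.Dict.contains_eq_isSome_get?, h]
      simp only [Option.isSome_some, if_true, Option.bind_some,
        PySem.Dict.getD_of_get?_eq_some (PySem.Dict.ofList xs) "" h]
      by_cases ht : tgt.contains g = true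
      · rw [if_pos ht, if_pos ht]
        exact pv_upd_eq acc2 g
      · rw [if_neg ht, if_neg ht]
        rfl
  rw [hfg]

-- B's break-loop equals a fold over the prefix of positions not past the window
theorem pv_loopB_takeWhile (lw rw : Int) (d : PySem.Dict Int String) (tgt : PySem.Set String)
    (ks : List Int) (acc : PySem.Dict String Int) :
    pvLoopB lw rw d tgt ks acc
      = (ks.takeWhile (fun i => !decide (rw < i))).foldl (fun counts index =>
          if lw ≤ index then
            let ngram := d.getD index ""
            if tgt.contains ngram then counts.insert ngram (counts.getD ngram 0 + 1) else counts
          else counts) acc := by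
  induction ks generalizing acc with
  | nil => rfl
  | cons k t ih =>
    by_cases h : rw < k
    · simp [pvLoopB, h, List.takeWhile]
    · simp only [pvLoopB, if_neg h, ih]
      have : (!decide (rw < k)) = true := by simpa using h
      simp [List.takeWhile, this]

-- on a strictly increasing list, stopping at the first element past rw = keeping those ≤ rw
theorem pv_takeWhile_filter (rw : Int) (ks : List Int) (h : ks.Pairwise (· < ·)) :
    ks.takeWhile (fun i => !decide (rw < i)) = ks.filter (fun i => !decide (rw < i)) := by
  induction ks with
  | nil => rfl
  | cons k t ih =>
    rcases List.pairwise_cons.mp h with ⟨hk, ht⟩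
    by_cases hrk : rw < k
    · have hfalse : (!decide (rw < k)) = false := by simpa using hrk
      rw [List.takeWhile_cons, hfalse]
      have : t.filter (fun i => !decide (rw < i)) = [] := by
        rw [List.filter_eq_nil_iff]
        intro x hx
        have := hk x hx
        simp; omega
      simp [hfalse, this]
    · have htrue : (!decide (rw < k)) = true := by simpa using hrk
      rw [List.takeWhile_cons, htrue]
      simp only [List.filter_cons, htrue, if_true]
      rw [ih ht]

-- a fold whose body is guarded by an if is a fold over the filtered list
theorem pv_foldl_if {α β : Type} (p : α → Prop) [DecidablePred p] (f : β → α → β) (l : List α) (init : β) :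
    l.foldl (fun a x => if p x then f a x else a) init = (l.filter (fun x => decide (p x))).foldl f init := by
  induction l generalizing init with
  | nil => rfl
  | cons x xs ih => by_cases h : p x <;> simp [h, ih]

-- the in-window sorted keys, hit-mapped, are exactly the window scan's hits
theorem pv_keys_filterMap (lw rw : Int) (d : PySem.Dict Int String) (hnd : d.keys.Nodup)
    (tgt : List String) :
    ((((PySem.List.sorted d.keys (fun i => i) false).filter
          (fun i => !decide (rw < i))).filter (fun i => decide (lw ≤ i))).filterMap
        (fun i => (d.get? i).bind (fun g => if tgt.contains g then some (i, g) else none)))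
      = ((PySem.List.pyRange lw (rw + 1) 1).filterMap
          (fun i => (d.get? i).bind (fun g => if tgt.contains g then some (i, g) else none))) := by
  have hndK : (PySem.List.sorted d.keys (fun i => i) false).Nodup :=
    (PySem.List.sorted_perm d.keys (fun i => i) false).symm.nodup hnd
  have hpwK : (PySem.List.sorted d.keys (fun i => i) false).Pairwise (· < ·) :=
    ((PySem.List.sorted_pairwise d.keys (fun i => i)).and hndK).imp
      (fun hab => lt_of_le_of_ne hab.1 hab.2)
  have hpwKF : ((((PySem.List.sorted d.keys (fun i => i) false).filter
      (fun i => !decide (rw < i))).filter (fun i => decide (lw ≤ i)))).Pairwise (· < ·) :=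
    (hpwK.filter _).filter _
  have hpw1 : ((((PySem.List.sorted d.keys (fun i => i) false).filter
      (fun i => !decide (rw < i))).filter (fun i => decide (lw ≤ i))).filterMap
        (fun i => (d.get? i).bind (fun g => if tgt.contains g then some (i, g) else none))).Pairwise
        (fun p q => p.1 < q.1) := by
    rw [List.pairwise_filterMap]
    refine hpwKF.imp ?_
    intro i j hij p hp q hq
    have h1 := ((pv_F_some d tgt i p).mp hp).1
    have h2 := ((pv_F_some d tgt j q).mp hq).1
    omega
  have hpw2 : ((PySem.List.pyRange lw (rw + 1) 1).filterMap
      (fun i => (d.get? i).bind (fun g => if tgt.contains g then some (i, g) else none))).Pairwise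
      (fun p q => p.1 < q.1) := by
    rw [List.pairwise_filterMap]
    refine (PySem.List.pairwise_lt_pyRange_one lw (rw + 1)).imp ?_
    intro i j hij p hp q hq
    have h1 := ((pv_F_some d tgt i p).mp hp).1
    have h2 := ((pv_F_some d tgt j q).mp hq).1
    omega
  have hmem : ∀ p, (p ∈ (((PySem.List.sorted d.keys (fun i => i) false).filter
        (fun i => !decide (rw < i))).filter (fun i => decide (lw ≤ i))).filterMap
          (fun i => (d.get? i).bind (fun g => if tgt.contains g then some (i, g) else none)))
      ↔ (p ∈ (PySem.List.pyRange lw (rw + 1) 1).filterMap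
          (fun i => (d.get? i).bind (fun g => if tgt.contains g then some (i, g) else none))) := by
    intro p
    simp only [List.mem_filterMap, List.mem_filter, PySem.List.mem_sorted,
      Bool.not_eq_eq_eq_not, Bool.not_true, decide_eq_false_iff_not, decide_eq_true_eq,
      PySem.List.mem_pyRange_one]
    constructor
    · rintro ⟨i, ⟨⟨hik, hirw⟩, hilw⟩, hFi⟩
      exact ⟨i, ⟨hilw, by omega⟩, hFi⟩
    · rintro ⟨i, ⟨hilw, hiub⟩, hFi⟩
      obtain ⟨h1, h2, h3⟩ := (pv_F_some d tgt i p).mp hFi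
      have hik : i ∈ d.keys := by
        by_contra hni
        rw [← PySem.Dict.get?_eq_none_iff_not_mem_keys] at hni
        rw [hni] at h2; cases h2
      exact ⟨i, ⟨⟨hik, by omega⟩, hilw⟩, hFi⟩
  have hnd1 : ((((PySem.List.sorted d.keys (fun i => i) false).filter
      (fun i => !decide (rw < i))).filter (fun i => decide (lw ≤ i))).filterMap
        (fun i => (d.get? i).bind (fun g => if tgt.contains g then some (i, g) else none))).Nodup :=
    hpw1.imp (fun {a b} h => by rintro rfl; exact lt_irrefl _ h)
  have hnd2 : ((PySem.List.pyRange lw (rw + 1) 1).filterMap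
      (fun i => (d.get? i).bind (fun g => if tgt.contains g then some (i, g) else none))).Nodup :=
    hpw2.imp (fun {a b} h => by rintro rfl; exact lt_irrefl _ h)
  have hperm := (List.perm_ext_iff_of_nodup hnd1 hnd2).mpr hmem
  have e1 := PySem.List.sorted_eq_of_perm_of_pairwise_lt _ _ _ hperm hpw1
  have e2 := PySem.List.sorted_eq_of_perm_of_pairwise_lt _ _ _ (List.Perm.refl _) hpw2
  exact e1.symm.trans e2

-- the two inner loops agree for every starting accumulator
theorem pv_inner_eq (lw rw : Int) (xs : List (Int × String)) (tgt : List String)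
    (acc : PySem.Dict String Int) :
    (PySem.List.pyRange lw (rw + 1) 1).foldl (fun acc2 index =>
        if (PySem.Dict.ofList xs).contains index then
          let ngram_in_position := (PySem.Dict.ofList xs).getD index ""
          if tgt.contains ngram_in_position then
            (if acc2.contains ngram_in_position then acc2
             else acc2.insert ngram_in_position 0).insert ngram_in_position
              ((if acc2.contains ngram_in_position then acc2
                else acc2.insert ngram_in_position 0).getD ngram_in_position 0 + 1)
          else acc2
        else acc2) acc
      = pvLoopB lw rw (PySem.Dict.ofList xs) (PySem.Set.ofList tgt)
          (PySem.List.sorted (PySem.Dict.ofList xs).keys (fun i => i) false) acc := by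
  have hnd : (PySem.Dict.ofList xs).keys.Nodup := PySem.Dict.nodup_keys_ofList xs
  have hndK : (PySem.List.sorted (PySem.Dict.ofList xs).keys (fun i => i) false).Nodup :=
    (PySem.List.sorted_perm (PySem.Dict.ofList xs).keys (fun i => i) false).symm.nodup hnd
  have hpwK : (PySem.List.sorted (PySem.Dict.ofList xs).keys (fun i => i) false).Pairwise (· < ·) :=
    ((PySem.List.sorted_pairwise (PySem.Dict.ofList xs).keys (fun i => i)).and hndK).imp
      (fun hab => lt_of_le_of_ne hab.1 hab.2)
  rw [pv_A_inner, pv_loopB_takeWhile,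
      pv_takeWhile_filter rw _ hpwK, pv_foldl_if (fun i => lw ≤ i),
      ← pv_keys_filterMap lw rw (PySem.Dict.ofList xs) hnd tgt, pv_foldl_filterMap]
  refine PySem.List.foldl_congr_mem' _ _ _ _ ?_
  intro i hi acc2
  have hik : i ∈ (PySem.Dict.ofList xs).keys := by
    have := (List.mem_filter.mp (List.mem_filter.mp hi).1).1
    exact (PySem.List.mem_sorted _ _ _ _).mp this
  obtain ⟨g, hg⟩ : ∃ g, (PySem.Dict.ofList xs).get? i = some g := by
    cases hget : (PySem.Dict.ofList xs).get? i with
    | none => rw [PySem.Dict.get?_eq_none_iff_not_mem_keys] at hget; exact absurd hik hget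
    | some g => exact ⟨g, rfl⟩
  have hcont : (PySem.Set.ofList tgt).contains g = tgt.contains g := by
    simp [PySem.Set.contains_eq_listContains, List.contains_eq_mem, PySem.Set.mem_ofList]
  simp only [hg, Option.bind_some, PySem.Dict.getD_of_get?_eq_some (PySem.Dict.ofList xs) "" hg,
    hcont]
  by_cases hm : g ∈ tgt
  · simp [hm]
  · simp [hm]

-- the outer loop over ngram sizes, with the two inner loops substituted
theorem pv_outer (lw rw : Int) (tgt : List String)
    (c : PySem.Dict Int (List (List (Int × String)))) (ks : List Int)
    (acc : PySem.Dict String Int) :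
    ks.foldl (fun acc ngram_size =>
      (PySem.List.pyRange lw (rw + 1) 1).foldl (fun acc2 index =>
        if (PySem.Dict.ofList ((PySem.List.pyGet? (c.getD ngram_size []) 1).getD [])).contains index then
          let ngram_in_position := (PySem.Dict.ofList ((PySem.List.pyGet? (c.getD ngram_size []) 1).getD [])).getD index ""
          if tgt.contains ngram_in_position then
            (if acc2.contains ngram_in_position then acc2
             else acc2.insert ngram_in_position 0).insert ngram_in_position
              ((if acc2.contains ngram_in_position then acc2
                else acc2.insert ngram_in_position 0).getD ngram_in_position 0 + 1)
          else acc2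
        else acc2) acc) acc
      = ks.foldl (fun acc ngram_size =>
          let indexes_ngrams := PySem.Dict.ofList ((PySem.List.pyGet? (c.getD ngram_size []) 1).getD [])
          pvLoopB lw rw indexes_ngrams (PySem.Set.ofList tgt)
            (PySem.List.sorted indexes_ngrams.keys (fun i => i) false) acc) acc := by
  induction ks generalizing acc with
  | nil => rfl
  | cons k t ih =>
    simp only [List.foldl_cons]
    rw [pv_inner_eq lw rw ((PySem.List.pyGet? (c.getD k []) 1).getD []) tgt acc]
    exact ih _

-- ===== VERDICT (by name: the statement is the Claim_ definition above) =====
theorem search_ngrams_in_window_spec : Claim_equal_search_ngrams_in_window := by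
  intro lw rw cont ng _ _
  show search_ngrams_in_window lw rw cont ng = search_ngrams_in_window_alt lw rw cont ng
  unfold search_ngrams_in_window search_ngrams_in_window_alt
  exact congrArg PySem.Dict.items
    (pv_outer lw rw ng (PySem.Dict.ofList cont) (PySem.Dict.ofList cont).keys PySem.Dict.empty)
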